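-- pv_equiv track=rewrite | github.com/DozzzeN/SKG | segmentation/test_sorting_sorting_addnoise_corr_test_sorting.py | search_segment_method_with_matching
-- ===== SOURCE A (Python) =====
-- def search_segment_method_with_matching(dataA, dataB, threshold):
--     # 按照窗长与阈值来找分段类型
--     start_index = []
--     for i in range(len(dataB)):
--         # 选择与当前接近的位置作为寻找起点
--         current_start_index = []
--         for j in range(len(dataA)):
--             if abs(dataB[i] - dataA[j]) < threshold:
--                 current_start_index.append(j)
--         start_index.append(current_start_index)
--     all_segments = []
--     # 将start_index的第一列放入all_segments的第一列，键为索引值，值为第一个分段起点以及其索引值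
--     current_segments = {}
--     for i in range(len(start_index[0])):
--         current_segments[start_index[0][i]] = str(0) + '-' + str(start_index[0][i])
--     all_segments.append(current_segments)
--     for i in range(1, len(dataB)):
--         current_segments = {}
--         for j in range(len(start_index[i])):
--             for k in range(len(start_index[i - 1])):
--                 # 如果某个分段包含某个子分段，该子分段不计入
--                 if start_index[i][j] == start_index[i - 1][k] + 1:
--                     if start_index[i - 1][k] not in all_segments[i - 1].keys():
--                         # 找到某个分段的起点，将其位置作为值插入
--                         all_segments[i - 1][start_index[i - 1][k]] = str(i - 1) + '-' + str(start_index[i - 1][k])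
--                         current_segments[start_index[i][j]] = str(i - 1) + '-' + str(start_index[i - 1][k])
--                     else:
--                         # 已经是某个分段的一部分，将分段起点作为值插入
--                         segment_start_point = all_segments[i - 1].get(start_index[i - 1][k])
--                         current_segments[start_index[i][j]] = segment_start_point
--         all_segments.append(current_segments)
--     return all_segments
-- ===== SOURCE B (Python) =====
-- def search_segment_method_with_matching(dataA, dataB, threshold):
--     # per-window lists of matching dataA indices (increasing, distinct)
--     present = [[j for j in range(len(dataA)) if abs(b - dataA[j]) < threshold]
--                for b in dataB]
--     psets = [set(p) for p in present]
--     n = len(dataB)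
--
--     def origin(w, p):
--         # walk backward along the diagonal to the origin of the chain
--         while 1 <= w and p - 1 in psets[w - 1]:
--             w, p = w - 1, p - 1
--         return f"{w}-{p}"
--
--     def window(i):
--         return {v: origin(i, v) for v in present[i] if v - 1 in psets[i - 1]}
--
--     segments = [{v: f"0-{v}" for v in present[0]}] + [window(i) for i in range(1, n)]
--
--     def finalize(i, seg):
--         # a position continued by the next window but not continuing the previous
--         # one starts a chain: it gets an entry in its own window
--         if 1 <= i and i + 1 < n:
--             for p in present[i]:
--                 if p + 1 in psets[i + 1] and p - 1 not in psets[i - 1]: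
--                     seg[p] = f"{i}-{p}"
--         return seg
--
--     return [finalize(i, seg) for i, seg in enumerate(segments)]
-- ===== Notes on version B (the rewrite author's own statement) =====
-- stated objective: alternative
-- what changed: B precomputes per-window match-index lists once and builds every window's dict directly: labels come from an independent backward origin-walk along the diagonal and chain-start keys from a closed-form neighbour test, replacing A's forward label propagation that mutates the previous window's dict while building the next.
-- outside the precondition, e.g. on search_segment_method_with_matching([1, 2], [], 1): A raises IndexError, B raises IndexError
import Mathlib
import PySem

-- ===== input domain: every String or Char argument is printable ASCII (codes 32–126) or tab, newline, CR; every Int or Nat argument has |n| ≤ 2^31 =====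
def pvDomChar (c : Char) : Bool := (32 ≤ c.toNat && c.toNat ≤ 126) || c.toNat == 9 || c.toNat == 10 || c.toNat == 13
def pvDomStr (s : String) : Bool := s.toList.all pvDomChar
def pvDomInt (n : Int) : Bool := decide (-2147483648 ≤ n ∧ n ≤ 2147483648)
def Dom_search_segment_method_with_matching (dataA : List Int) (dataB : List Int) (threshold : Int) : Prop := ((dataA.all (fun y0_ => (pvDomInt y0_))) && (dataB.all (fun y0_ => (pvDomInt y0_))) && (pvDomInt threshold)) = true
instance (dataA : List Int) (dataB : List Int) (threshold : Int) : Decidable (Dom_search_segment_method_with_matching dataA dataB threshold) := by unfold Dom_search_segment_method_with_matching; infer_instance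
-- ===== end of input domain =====

-- B rebuilds each window's dict directly from precomputed per-window match-index lists,
-- labelling by an independent backward origin walk and adding chain-start keys by a
-- closed-form neighbour test, instead of A's forward label propagation that mutates the
-- previous window's dict in place (objective: alternative; same asymptotic cost).


-- ===== PORT A =====
-- str(w) + '-' + str(p), the segment label both Pythons build
def pvLabel (w : Int) (p : Int) : String := PySem.Int.toStr w ++ "-" ++ PySem.Int.toStr p

-- literal transliteration of A: index loops are folds over pyRange, dicts are PySem.Dict,
-- all_segments[i-1] is mutated via pySetD; dicts are rendered as .items at the end.
def search_segment_method_with_matching (dataA : List Int) (dataB : List Int) (threshold : Int) : List (List (Int × String)) :=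
  let startIndex : List (List Int) :=
    (PySem.List.pyRange 0 dataB.length 1).foldl (fun si i =>
      si ++ [(PySem.List.pyRange 0 dataA.length 1).foldl (fun cur j =>
        if |PySem.List.pyGetD dataB i 0 - PySem.List.pyGetD dataA j 0| < threshold
        then cur ++ [j] else cur) []]) []
  -- start_index[0] raises IndexError for empty dataB: excluded by Pre_
  let s0 : List Int := PySem.List.pyGetD startIndex 0 []
  let firstSeg : PySem.Dict Int String :=
    (PySem.List.pyRange 0 s0.length 1).foldl (fun d i =>
      d.insert (PySem.List.pyGetD s0 i 0) (pvLabel 0 (PySem.List.pyGetD s0 i 0))) PySem.Dict.empty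
  let allSegments : List (PySem.Dict Int String) :=
    (PySem.List.pyRange 1 dataB.length 1).foldl (fun allSegs i =>
      let si := PySem.List.pyGetD startIndex i []
      let sp := PySem.List.pyGetD startIndex (i - 1) []
      let st :=
        (PySem.List.pyRange 0 si.length 1).foldl
          (fun (st : List (PySem.Dict Int String) × PySem.Dict Int String) j =>
            (PySem.List.pyRange 0 sp.length 1).foldl (fun st k =>
              let v := PySem.List.pyGetD si j 0
              let p := PySem.List.pyGetD sp k 0
              if v = p + 1 then
                let prev := PySem.List.pyGetD st.1 (i - 1) PySem.Dict.empty
                if prev.contains p = false then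
                  (PySem.List.pySetD st.1 (i - 1) (prev.insert p (pvLabel (i - 1) p)),
                   st.2.insert v (pvLabel (i - 1) p))
                else
                  -- prev.get p is always some here (contains just checked); .getD "" is unreachable
                  (st.1, st.2.insert v ((prev.get? p).getD ""))
              else st) st)
          (allSegs, PySem.Dict.empty)
      st.1 ++ [st.2]) [firstSeg]
  allSegments.map (fun d => d.items)

-- ===== PORT B =====
-- origin(w, p): walk backward along the diagonal while the previous window contains p-1
def pvOrigin (psets : List (PySem.Set Int)) (w : Int) (p : Int) : String :=
  if h : 1 ≤ w ∧ (p - 1) ∈ PySem.List.pyGetD psets (w - 1) [] then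
    pvOrigin psets (w - 1) (p - 1)
  else pvLabel w p
termination_by w.toNat
decreasing_by omega

def pvWindow (pres : List (List Int)) (psets : List (PySem.Set Int)) (i : Int) :
    PySem.Dict Int String :=
  PySem.Dict.ofList ((PySem.List.pyGetD pres i []).filterMap (fun v =>
    if v - 1 ∈ PySem.List.pyGetD psets (i - 1) [] then some (v, pvOrigin psets i v) else none))

def pvFinalize (pres : List (List Int)) (psets : List (PySem.Set Int)) (n : Int) (i : Int)
    (seg : PySem.Dict Int String) : PySem.Dict Int String :=
  if 1 ≤ i ∧ i + 1 < n then
    ((PySem.List.pyGetD pres i []).filter (fun p =>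
        decide (p + 1 ∈ PySem.List.pyGetD psets (i + 1) []) &&
        !decide (p - 1 ∈ PySem.List.pyGetD psets (i - 1) []))).foldl
      (fun d p => d.insert p (pvLabel i p)) seg
  else seg

-- literal transliteration of Source B
def search_segment_method_with_matching_alt (dataA : List Int) (dataB : List Int) (threshold : Int) : List (List (Int × String)) :=
  let present : List (List Int) := dataB.map (fun b =>
    (PySem.List.pyRange 0 dataA.length 1).filter (fun j =>
      |b - PySem.List.pyGetD dataA j 0| < threshold))
  let psets : List (PySem.Set Int) := present.map PySem.Set.ofList
  let n : Int := dataB.length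
  -- present[0] raises IndexError for empty dataB: excluded by Pre_
  let firstSeg : PySem.Dict Int String :=
    PySem.Dict.ofList ((PySem.List.pyGetD present 0 []).map (fun v => (v, pvLabel 0 v)))
  let segments : List (PySem.Dict Int String) :=
    firstSeg :: (PySem.List.pyRange 1 n 1).map (fun i => pvWindow present psets i)
  (PySem.List.enumerate segments 0).map (fun iseg =>
    (pvFinalize present psets n iseg.1 iseg.2).items)

-- ===== PRECONDITION & SPEC =====
-- Pre_ excludes exactly empty dataB, on which both Pythons raise IndexError (start_index[0] / present[0]).
def Pre_search_segment_method_with_matching (dataA : List Int) (dataB : List Int) (threshold : Int) : Prop := dataB ≠ []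
instance (dataA : List Int) (dataB : List Int) (threshold : Int) : Decidable (Pre_search_segment_method_with_matching dataA dataB threshold) := by unfold Pre_search_segment_method_with_matching; infer_instance

def pvWitness_search_segment_method_with_matching : List Int × List Int × Int := ([0, 1, 2], [0, 1], 1)

def Spec_search_segment_method_with_matching (dataA : List Int) (dataB : List Int) (threshold : Int) (out : List (List (Int × String))) : Prop := out = search_segment_method_with_matching_alt dataA dataB threshold
instance (dataA : List Int) (dataB : List Int) (threshold : Int) (out : List (List (Int × String))) : Decidable (Spec_search_segment_method_with_matching dataA dataB threshold out) := by unfold Spec_search_segment_method_with_matching; infer_instance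

-- ===== CLAIM (what is proved, stated in full; the proofs are below) =====
def Claim_equal_search_segment_method_with_matching : Prop := ∀ (dataA : List Int) (dataB : List Int) (threshold : Int), Dom_search_segment_method_with_matching dataA dataB threshold → Pre_search_segment_method_with_matching dataA dataB threshold → Spec_search_segment_method_with_matching dataA dataB threshold (search_segment_method_with_matching dataA dataB threshold)

-- ===== LEMMAS AND PROOFS =====


-- dict and list helper lemmas ----------------------------------------------

theorem pv_items_ofList_nodup {κ ν : Type} [BEq κ] [LawfulBEq κ] (ps : List (κ × ν))
    (h : (ps.map Prod.fst).Nodup) : (PySem.Dict.ofList ps).items = ps := by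
  have := PySem.Dict.items_foldl_insert_fresh (ν := ν) ps Prod.fst Prod.snd PySem.Dict.empty
    (by intro a _; exact PySem.Dict.contains_empty _) h
  simpa [PySem.Dict.ofList, PySem.Dict.update, PySem.Dict.empty] using this

theorem pv_filterMap_if_eq_map_filter {β : Type} (l : List Int) (c : Int → Prop) [DecidablePred c] (F : Int → β) :
    l.filterMap (fun v => if c v then some (F v) else none) = (l.filter (fun v => decide (c v))).map F := by
  induction l with
  | nil => rfl
  | cons x xs ih => by_cases hx : c x <;> simp [hx, ih]

theorem pv_foldl_noop {σ : Type} (f : σ → Int → σ) (v : Int) :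
    ∀ (sp : List Int) (st : σ), (∀ p ∈ sp, v ≠ p + 1) →
    sp.foldl (fun st p => if v = p + 1 then f st p else st) st = st := by
  intro sp
  induction sp with
  | nil => intro st _; rfl
  | cons p rest ih =>
    intro st h
    have hp : v ≠ p + 1 := h p (by simp)
    simp only [List.foldl_cons, if_neg hp]
    exact ih st (fun q hq => h q (by simp [hq]))

theorem pv_foldl_unique {σ : Type} (f : σ → Int → σ) (v : Int) :
    ∀ (sp : List Int) (st : σ), sp.Nodup →
    sp.foldl (fun st p => if v = p + 1 then f st p else st) st
      = if v - 1 ∈ sp then f st (v - 1) else st := by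
  intro sp
  induction sp with
  | nil => intro st _; simp
  | cons p rest ih =>
    intro st hnd
    rcases List.nodup_cons.mp hnd with ⟨hpn, hrest⟩
    by_cases hp : v = p + 1
    · have hv : v - 1 = p := by omega
      have hnot : v - 1 ∉ rest := by rw [hv]; exact hpn
      simp only [List.foldl_cons, if_pos hp]
      rw [pv_foldl_noop f v rest (f st p) (by intro q hq heq; exact hnot (by rw [show v - 1 = q by omega]; exact hq))]
      simp [hv, hpn]
    · have hv : v - 1 ≠ p := by omega
      simp only [List.foldl_cons, if_neg hp]
      rw [ih st hrest]
      simp [hv]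

theorem pv_getD_prop {α : Type} (P : α → Prop) (xs : List α) (i : Int) (d : α)
    (hd : P d) (hxs : ∀ x ∈ xs, P x) (hi : 0 ≤ i) : P (PySem.List.pyGetD xs i d) := by
  rw [PySem.List.pyGetD_of_nonneg xs d hi]
  rcases lt_or_ge i.toNat xs.length with h | h
  · rw [List.getD_eq_getElem xs d h]; exact hxs _ (List.getElem_mem h)
  · rw [List.getD_eq_default xs d h]; exact hd

theorem pv_mem_psets (pres : List (List Int)) (w x : Int) :
    (x ∈ PySem.List.pyGetD (pres.map PySem.Set.ofList) w []) ↔ x ∈ PySem.List.pyGetD pres w [] := by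
  rw [show ([] : PySem.Set Int) = PySem.Set.ofList [] from rfl, PySem.List.pyGetD_map]
  exact PySem.Set.mem_ofList _ _

theorem pv_pairwise_map_sub_one (l : List Int) (h : l.Pairwise (· < ·)) :
    (l.map (· - 1)).Pairwise (· < ·) :=
  List.pairwise_map.mpr (h.imp (by intro a b hab; omega))

theorem pv_nodup_of_pairwise_lt (l : List Int) (h : l.Pairwise (· < ·)) : l.Nodup :=
  h.imp (by intro a b hab; exact ne_of_lt hab)

-- the diagonal shift: enumerating continuations from the next window equals
-- enumerating continued positions of the current window
theorem pv_shift (si sp : List Int) (C : Int → Bool)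
    (h1 : si.Pairwise (· < ·)) (h2 : sp.Pairwise (· < ·)) :
    (si.filter (fun v => decide (v - 1 ∈ sp) && C (v - 1))).map (· - 1)
      = sp.filter (fun p => decide (p + 1 ∈ si) && C p) := by
  have hL : ((si.filter (fun v => decide (v - 1 ∈ sp) && C (v - 1))).map (· - 1)).Pairwise (· < ·) :=
    pv_pairwise_map_sub_one _ (h1.filter _)
  have hR : (sp.filter (fun p => decide (p + 1 ∈ si) && C p)).Pairwise (· < ·) := h2.filter _
  have hmem : ∀ x : Int, x ∈ (si.filter (fun v => decide (v - 1 ∈ sp) && C (v - 1))).map (· - 1)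
      ↔ x ∈ sp.filter (fun p => decide (p + 1 ∈ si) && C p) := by
    intro x
    simp only [List.mem_map, List.mem_filter, Bool.and_eq_true, decide_eq_true_eq]
    constructor
    · rintro ⟨v, ⟨hv, hsp, hc⟩, rfl⟩; exact ⟨hsp, by simpa using hv, hc⟩
    · rintro ⟨hsp, hsi, hc⟩; exact ⟨x + 1, ⟨hsi, by simpa using hsp, by simpa using hc⟩, by omega⟩
  have hperm : ((si.filter (fun v => decide (v - 1 ∈ sp) && C (v - 1))).map (· - 1)).Perm
      (sp.filter (fun p => decide (p + 1 ∈ si) && C p)) := by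
    apply (List.perm_ext_iff_of_nodup (pv_nodup_of_pairwise_lt _ hL) (pv_nodup_of_pairwise_lt _ hR)).mpr
    exact hmem
  calc (si.filter (fun v => decide (v - 1 ∈ sp) && C (v - 1))).map (· - 1)
      = PySem.List.sorted (sp.filter (fun p => decide (p + 1 ∈ si) && C p)) id := by
        exact (PySem.List.sorted_eq_of_perm_of_pairwise_lt _ _ id hperm (by simpa using hL)).symm
    _ = sp.filter (fun p => decide (p + 1 ∈ si) && C p) := by
        exact PySem.List.sorted_eq_of_perm_of_pairwise_lt _ _ id (List.Perm.refl _) (by simpa using hR)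


-- window characterization --------------------------------------------------

theorem pvOrigin_step (pres : List (List Int)) (w p : Int) (h1 : 1 ≤ w)
    (h2 : p - 1 ∈ PySem.List.pyGetD pres (w - 1) []) :
    pvOrigin (pres.map PySem.Set.ofList) w p = pvOrigin (pres.map PySem.Set.ofList) (w - 1) (p - 1) := by
  rw [pvOrigin, dif_pos ⟨h1, (pv_mem_psets pres (w - 1) (p - 1)).mpr h2⟩]

theorem pvOrigin_stop (pres : List (List Int)) (w p : Int)
    (h : ¬ (1 ≤ w ∧ p - 1 ∈ PySem.List.pyGetD pres (w - 1) [])) :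
    pvOrigin (pres.map PySem.Set.ofList) w p = pvLabel w p := by
  rw [pvOrigin, dif_neg (fun hc => h ⟨hc.1, (pv_mem_psets pres (w - 1) (p - 1)).mp hc.2⟩)]

theorem pv_items_window (pres : List (List Int)) (w : Int)
    (hnd : (PySem.List.pyGetD pres w []).Nodup) :
    (pvWindow pres (pres.map PySem.Set.ofList) w).items = ((PySem.List.pyGetD pres w []).filter
        (fun v => decide (v - 1 ∈ PySem.List.pyGetD pres (w - 1) []))).map
      (fun v => (v, pvOrigin (pres.map PySem.Set.ofList) w v)) := by
  unfold pvWindow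
  simp only [pv_mem_psets]
  rw [pv_filterMap_if_eq_map_filter]
  apply pv_items_ofList_nodup
  rw [List.map_map]
  simpa [Function.comp_def] using hnd.filter (fun v => decide (v - 1 ∈ PySem.List.pyGetD pres (w - 1) []))

theorem pv_keys_window (pres : List (List Int)) (w : Int)
    (hnd : (PySem.List.pyGetD pres w []).Nodup) :
    (pvWindow pres (pres.map PySem.Set.ofList) w).keys = (PySem.List.pyGetD pres w []).filter
      (fun v => decide (v - 1 ∈ PySem.List.pyGetD pres (w - 1) [])) := by
  show (pvWindow pres (pres.map PySem.Set.ofList) w).items.map Prod.fst = _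
  rw [pv_items_window pres w hnd, List.map_map]
  simp [Function.comp_def]

theorem pv_contains_window (pres : List (List Int)) (w : Int) (q : Int)
    (hnd : (PySem.List.pyGetD pres w []).Nodup) :
    (pvWindow pres (pres.map PySem.Set.ofList) w).contains q = true
      ↔ q ∈ PySem.List.pyGetD pres w [] ∧ q - 1 ∈ PySem.List.pyGetD pres (w - 1) [] := by
  rw [PySem.Dict.contains_iff_mem_keys, pv_keys_window pres w hnd]
  simp [List.mem_filter]

theorem pv_get?_window (pres : List (List Int)) (w : Int) (q : Int)
    (hnd : (PySem.List.pyGetD pres w []).Nodup)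
    (hq : q ∈ PySem.List.pyGetD pres w []) (hq1 : q - 1 ∈ PySem.List.pyGetD pres (w - 1) []) :
    (pvWindow pres (pres.map PySem.Set.ofList) w).get? q = some (pvOrigin (pres.map PySem.Set.ofList) w q) := by
  apply PySem.Dict.get?_of_mem_items
  · rw [pv_items_window pres w hnd]
    exact List.mem_map_of_mem (by simp [List.mem_filter, hq, hq1])
  · rw [pv_keys_window pres w hnd]
    exact hnd.filter _

-- the window-0 dict
theorem pv_first_fold_eq (s0 : List Int) :
    s0.foldl (fun d v => d.insert v (pvLabel 0 v)) PySem.Dict.empty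
      = PySem.Dict.ofList (s0.map (fun v => (v, pvLabel 0 v))) := by
  simp [PySem.Dict.ofList, PySem.Dict.update, List.foldl_map]

theorem pv_items_first (s0 : List Int) (hnd : s0.Nodup) :
    (PySem.Dict.ofList (s0.map (fun v => (v, pvLabel 0 v)))).items
      = s0.map (fun v => (v, pvLabel 0 v)) := by
  apply pv_items_ofList_nodup
  rw [List.map_map]; simpa [Function.comp_def] using hnd

theorem pv_keys_first (s0 : List Int) (hnd : s0.Nodup) :
    (PySem.Dict.ofList (s0.map (fun v => (v, pvLabel 0 v)))).keys = s0 := by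
  show (PySem.Dict.ofList (s0.map (fun v => (v, pvLabel 0 v)))).items.map Prod.fst = s0
  rw [pv_items_first s0 hnd, List.map_map]; simp [Function.comp_def]

theorem pv_contains_first (s0 : List Int) (q : Int) (hnd : s0.Nodup) :
    (PySem.Dict.ofList (s0.map (fun v => (v, pvLabel 0 v)))).contains q = true ↔ q ∈ s0 := by
  rw [PySem.Dict.contains_iff_mem_keys, pv_keys_first s0 hnd]

theorem pv_get?_first (s0 : List Int) (q : Int) (hnd : s0.Nodup) (hq : q ∈ s0) :
    (PySem.Dict.ofList (s0.map (fun v => (v, pvLabel 0 v)))).get? q = some (pvLabel 0 q) := by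
  apply PySem.Dict.get?_of_mem_items
  · rw [pv_items_first s0 hnd]; exact List.mem_map_of_mem hq
  · rw [pv_keys_first s0 hnd]; exact hnd


-- small dict lemmas on the raw items list -----------------------------------

theorem pv_dict_eta {κ ν : Type} [BEq κ] (d : PySem.Dict κ ν) : PySem.Dict.mk d.items = d := rfl

theorem pv_contains_mk_append {κ ν : Type} [BEq κ] (l₁ l₂ : List (κ × ν)) (q : κ) :
    (PySem.Dict.mk (l₁ ++ l₂)).contains q
      = ((PySem.Dict.mk l₁).contains q || (PySem.Dict.mk l₂).contains q) := by
  simp [PySem.Dict.contains, List.any_append]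

theorem pv_contains_mk_false_of_not_mem_keys {κ ν : Type} [BEq κ] [LawfulBEq κ]
    (l : List (κ × ν)) (q : κ) (h : q ∉ l.map Prod.fst) : (PySem.Dict.mk l).contains q = false := by
  simp only [PySem.Dict.contains, List.any_eq_false]
  intro p hp he
  exact h (eq_of_beq he ▸ List.mem_map_of_mem hp)

theorem pv_get?_mk_append_left {κ ν : Type} [BEq κ] (l₁ l₂ : List (κ × ν)) (q : κ)
    (h : (PySem.Dict.mk l₁).contains q = true) :
    (PySem.Dict.mk (l₁ ++ l₂)).get? q = (PySem.Dict.mk l₁).get? q := by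
  have h' : l₁.any (fun p => p.1 == q) = true := h
  have hsome : (List.find? (fun p => p.1 == q) l₁).isSome := by
    rw [List.find?_isSome]; exact List.any_eq_true.mp h'
  show (List.find? (fun p => p.1 == q) (l₁ ++ l₂)).map Prod.snd
      = (List.find? (fun p => p.1 == q) l₁).map Prod.snd
  rw [List.find?_append]
  rcases Option.isSome_iff_exists.mp hsome with ⟨x, hx⟩
  rw [hx]; rfl

theorem pv_insert_mk_of_not_contains {κ ν : Type} [BEq κ] (d : PySem.Dict κ ν) (k : κ) (v : ν)
    (h : d.contains k = false) : d.insert k v = PySem.Dict.mk (d.items ++ [(k, v)]) :=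
  PySem.Dict.ext (PySem.Dict.items_insert_of_not_contains d v h)

-- the outer fold of A's step, over the values of the current window ---------

theorem pvOuterAux (sp : List Int) (lw : Int) (d0 : PySem.Dict Int String) (orig : Int → String)
    (hget : ∀ q ∈ sp, d0.contains q = true → d0.get? q = some (orig (q + 1)))
    (hlab : ∀ q ∈ sp, d0.contains q = false → pvLabel lw q = orig (q + 1)) :
    ∀ (si : List Int) (R W : List (Int × String)), si.Nodup →
    (∀ v ∈ si, v - 1 ∉ R.map Prod.fst) → (∀ v ∈ si, v ∉ W.map Prod.fst) →
    si.foldl (fun st v => if v - 1 ∈ sp then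
        (if (st.1.contains (v - 1)) = false then
          (st.1.insert (v - 1) (pvLabel lw (v - 1)), st.2.insert v (pvLabel lw (v - 1)))
        else (st.1, st.2.insert v ((st.1.get? (v - 1)).getD "")))
      else st) (PySem.Dict.mk (d0.items ++ R), PySem.Dict.mk W)
    = (PySem.Dict.mk (d0.items ++ (R ++ si.filterMap (fun v =>
          if v - 1 ∈ sp ∧ d0.contains (v - 1) = false then some (v - 1, pvLabel lw (v - 1)) else none))),
       PySem.Dict.mk (W ++ si.filterMap (fun v =>
          if v - 1 ∈ sp then some (v, orig v) else none))) := by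
  intro si
  induction si with
  | nil =>
    intro R W _ _ _
    simp only [List.foldl_nil, List.filterMap_nil, List.append_nil]
  | cons v rest ih =>
    intro R W hnd hR hW
    rcases List.nodup_cons.mp hnd with ⟨hvr, hrest⟩
    have hRv : v - 1 ∉ R.map Prod.fst := hR v (by simp)
    have hWv : v ∉ W.map Prod.fst := hW v (by simp)
    have hcontR : (PySem.Dict.mk R).contains (v - 1) = false :=
      pv_contains_mk_false_of_not_mem_keys R (v - 1) hRv
    have hcontD : (PySem.Dict.mk (d0.items ++ R)).contains (v - 1) = d0.contains (v - 1) := by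
      rw [pv_contains_mk_append, hcontR, pv_dict_eta, Bool.or_false]
    have hcontW : (PySem.Dict.mk W).contains v = false :=
      pv_contains_mk_false_of_not_mem_keys W v hWv
    by_cases hv : v - 1 ∈ sp
    · by_cases hc : d0.contains (v - 1) = false
      · -- fresh key: both dicts gain an entry
        have hlab' : pvLabel lw (v - 1) = orig v := by
          have := hlab (v - 1) hv hc
          rwa [show v - 1 + 1 = v by omega] at this
        have hins : (PySem.Dict.mk (d0.items ++ R)).insert (v - 1) (pvLabel lw (v - 1))
            = PySem.Dict.mk (d0.items ++ (R ++ [(v - 1, pvLabel lw (v - 1))])) := by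
          rw [pv_insert_mk_of_not_contains _ _ _ (by rw [hcontD]; exact hc)]
          simp
        have hins2 : (PySem.Dict.mk W).insert v (pvLabel lw (v - 1))
            = PySem.Dict.mk (W ++ [(v, orig v)]) := by
          rw [pv_insert_mk_of_not_contains _ _ _ hcontW, hlab']
        simp only [List.foldl_cons, if_pos hv, hcontD, hc]
        rw [if_true, hins, hins2]
        rw [ih (R ++ [(v - 1, pvLabel lw (v - 1))]) (W ++ [(v, orig v)]) hrest
          (by intro v' hv'; simp only [List.map_append, List.mem_append]
              push Not
              refine ⟨hR v' (by simp [hv']), ?_⟩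
              have : v' ≠ v := fun he => hvr (he ▸ hv')
              simp; omega)
          (by intro v' hv'; simp only [List.map_append, List.mem_append]
              push Not
              refine ⟨hW v' (by simp [hv']), ?_⟩
              have : v' ≠ v := fun he => hvr (he ▸ hv')
              simp [this])]
        simp only [List.filterMap_cons, if_pos (And.intro hv hc), if_pos hv]
        simp
      · -- existing key: only the current window's dict gains an entry
        have hctrue : d0.contains (v - 1) = true := by
          cases h' : d0.contains (v - 1) with
          | false => exact absurd h' hc
          | true => rfl
        have hgd : (PySem.Dict.mk (d0.items ++ R)).get? (v - 1) = some (orig v) := by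
          rw [pv_get?_mk_append_left _ _ _ (by rw [pv_dict_eta]; exact hctrue), pv_dict_eta]
          have := hget (v - 1) hv hctrue
          rwa [show v - 1 + 1 = v by omega] at this
        have hins2 : (PySem.Dict.mk W).insert v (((PySem.Dict.mk (d0.items ++ R)).get? (v - 1)).getD "")
            = PySem.Dict.mk (W ++ [(v, orig v)]) := by
          rw [hgd, pv_insert_mk_of_not_contains _ _ _ hcontW]; rfl
        simp only [List.foldl_cons, if_pos hv, hcontD, hctrue]
        simp only [Bool.true_eq_false, if_false]
        rw [hins2]
        rw [ih R (W ++ [(v, orig v)]) hrest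
          (by intro v' hv'; exact hR v' (by simp [hv']))
          (by intro v' hv'; simp only [List.map_append, List.mem_append]
              push Not
              refine ⟨hW v' (by simp [hv']), ?_⟩
              have : v' ≠ v := fun he => hvr (he ▸ hv')
              simp [this])]
        have hfr : ¬ (v - 1 ∈ sp ∧ d0.contains (v - 1) = false) := fun h' => hc h'.2
        simp only [List.filterMap_cons, if_neg hfr, if_pos hv]
        simp
    · -- no continuation: nothing happens
      simp only [List.foldl_cons, if_neg hv]
      rw [ih R W hrest (by intro v' hv'; exact hR v' (by simp [hv']))
        (by intro v' hv'; exact hW v' (by simp [hv']))]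
      simp only [List.filterMap_cons, if_neg (fun h' : _ ∧ _ => hv h'.1), if_neg hv]


-- A's per-window step on the pure pair state --------------------------------

def pvPairBody (sp : List Int) (lw : Int)
    (st : PySem.Dict Int String × PySem.Dict Int String) (v : Int) :
    PySem.Dict Int String × PySem.Dict Int String :=
  if v - 1 ∈ sp then
    (if (st.1.contains (v - 1)) = false then
      (st.1.insert (v - 1) (pvLabel lw (v - 1)), st.2.insert v (pvLabel lw (v - 1)))
    else (st.1, st.2.insert v ((st.1.get? (v - 1)).getD "")))
  else st

theorem pvOuter (sp : List Int) (lw : Int) (d0 : PySem.Dict Int String) (orig : Int → String)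
    (si : List Int) (hnd : si.Nodup)
    (hget : ∀ q ∈ sp, d0.contains q = true → d0.get? q = some (orig (q + 1)))
    (hlab : ∀ q ∈ sp, d0.contains q = false → pvLabel lw q = orig (q + 1)) :
    si.foldl (pvPairBody sp lw) (d0, PySem.Dict.empty)
    = (PySem.Dict.mk (d0.items ++ si.filterMap (fun v =>
          if v - 1 ∈ sp ∧ d0.contains (v - 1) = false then some (v - 1, pvLabel lw (v - 1)) else none)),
       PySem.Dict.mk (si.filterMap (fun v =>
          if v - 1 ∈ sp then some (v, orig v) else none))) := by
  have := pvOuterAux sp lw d0 orig hget hlab si [] [] hnd (by simp) (by simp)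
  simpa [pvPairBody, PySem.Dict.empty, pv_dict_eta] using this

theorem pv_getD_last {α : Type} (pl : List α) (d dflt : α) :
    (pl ++ [d]).getD pl.length dflt = d := by
  induction pl with
  | nil => rfl
  | cons x xs ih => simpa using ih

theorem pv_set_last {α : Type} (pl : List α) (d d' : α) :
    (pl ++ [d]).set pl.length d' = pl ++ [d'] := by
  induction pl with
  | nil => rfl
  | cons x xs ih => simpa using ih

-- carrying the prefix of finished windows through A's fold
theorem pvPairRed (sp : List Int) (lw : Int) :
    ∀ (si : List Int) (pl : List (PySem.Dict Int String)) (d cur : PySem.Dict Int String),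
    lw = (pl.length : Int) →
    si.foldl (fun st v => if v - 1 ∈ sp then
        (if ((PySem.List.pyGetD st.1 lw PySem.Dict.empty).contains (v - 1)) = false then
          (PySem.List.pySetD st.1 lw
             ((PySem.List.pyGetD st.1 lw PySem.Dict.empty).insert (v - 1) (pvLabel lw (v - 1))),
           st.2.insert v (pvLabel lw (v - 1)))
        else (st.1, st.2.insert v (((PySem.List.pyGetD st.1 lw PySem.Dict.empty).get? (v - 1)).getD "")))
      else st) (pl ++ [d], cur)
    = (pl ++ [(si.foldl (pvPairBody sp lw) (d, cur)).1], (si.foldl (pvPairBody sp lw) (d, cur)).2) := by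
  intro si
  induction si with
  | nil => intro pl d cur _; simp
  | cons v rest ih =>
    intro pl d cur hlw
    have hgd : PySem.List.pyGetD (pl ++ [d]) lw PySem.Dict.empty = d := by
      rw [hlw, PySem.List.pyGetD_natCast, pv_getD_last]
    have hsd : ∀ d' : PySem.Dict Int String, PySem.List.pySetD (pl ++ [d]) lw d' = pl ++ [d'] := by
      intro d'; rw [hlw, PySem.List.pySetD_natCast, pv_set_last]
    simp only [List.foldl_cons, hgd, hsd]
    by_cases hv : v - 1 ∈ sp
    · by_cases hc : d.contains (v - 1) = false
      · simp only [if_pos hv, hc, if_true]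
        rw [ih pl _ _ hlw]
        simp [pvPairBody, hv, hc]
      · have hcc : d.contains (v - 1) = true := by
          cases h' : d.contains (v - 1) with
          | false => exact absurd h' hc
          | true => rfl
        simp only [if_pos hv, hcc, Bool.true_eq_false, if_false]
        rw [ih pl _ _ hlw]
        simp [pvPairBody, hv, hcc]
    · simp only [if_neg hv]
      rw [ih pl _ _ hlw]
      simp [pvPairBody, hv]


-- unified view of the dict A keeps for window w, before retro insertions -----

def pvSegD (pres : List (List Int)) (w : Int) : PySem.Dict Int String :=
  if w = 0 then PySem.Dict.ofList ((PySem.List.pyGetD pres 0 []).map (fun v => (v, pvLabel 0 v)))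
  else pvWindow pres (pres.map PySem.Set.ofList) w

theorem pv_window_eq_mk (pres : List (List Int)) (w : Int)
    (hnd : (PySem.List.pyGetD pres w []).Nodup) :
    pvWindow pres (pres.map PySem.Set.ofList) w = PySem.Dict.mk ((PySem.List.pyGetD pres w []).filterMap (fun v =>
      if v - 1 ∈ PySem.List.pyGetD pres (w - 1) [] then some (v, pvOrigin (pres.map PySem.Set.ofList) w v) else none)) := by
  apply PySem.Dict.ext
  rw [pv_items_window pres w hnd]
  show _ = (PySem.List.pyGetD pres w []).filterMap _
  rw [pv_filterMap_if_eq_map_filter]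

theorem pv_contains_seg (pres : List (List Int)) (w q : Int)
    (hW : ∀ u : Int, 0 ≤ u → (PySem.List.pyGetD pres u []).Pairwise (· < ·)) (hw : 0 ≤ w) :
    (pvSegD pres w).contains q = true
      ↔ (q ∈ PySem.List.pyGetD pres w [] ∧ (w = 0 ∨ q - 1 ∈ PySem.List.pyGetD pres (w - 1) [])) := by
  have hnd := pv_nodup_of_pairwise_lt _ (hW w hw)
  unfold pvSegD
  split_ifs with h0
  · subst h0; rw [pv_contains_first _ _ hnd]; simp
  · rw [pv_contains_window _ _ _ hnd]; simp [h0]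

theorem pv_contains_seg_bool (pres : List (List Int)) (w q : Int)
    (hW : ∀ u : Int, 0 ≤ u → (PySem.List.pyGetD pres u []).Pairwise (· < ·)) (hw : 0 ≤ w) :
    (pvSegD pres w).contains q
      = (decide (q ∈ PySem.List.pyGetD pres w [])
          && (decide (w = 0) || decide (q - 1 ∈ PySem.List.pyGetD pres (w - 1) []))) := by
  rw [Bool.eq_iff_iff, pv_contains_seg pres w q hW hw]
  simp

theorem pv_get?_seg (pres : List (List Int)) (w q : Int)
    (hW : ∀ u : Int, 0 ≤ u → (PySem.List.pyGetD pres u []).Pairwise (· < ·)) (hw : 0 ≤ w)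
    (hq : q ∈ PySem.List.pyGetD pres w [])
    (hor : w = 0 ∨ q - 1 ∈ PySem.List.pyGetD pres (w - 1) []) :
    (pvSegD pres w).get? q = some (pvOrigin (pres.map PySem.Set.ofList) w q) := by
  have hnd := pv_nodup_of_pairwise_lt _ (hW w hw)
  unfold pvSegD
  split_ifs with h0
  · subst h0
    rw [pv_get?_first _ _ hnd hq, pvOrigin_stop pres 0 q (by intro h; omega)]
  · rcases hor with h | h
    · exact absurd h h0
    · exact pv_get?_window pres w q hnd hq h

theorem pv_hget (pres : List (List Int)) (i : Int)
    (hW : ∀ u : Int, 0 ≤ u → (PySem.List.pyGetD pres u []).Pairwise (· < ·)) (hi : 1 ≤ i) :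
    ∀ q ∈ PySem.List.pyGetD pres (i - 1) [], (pvSegD pres (i - 1)).contains q = true →
      (pvSegD pres (i - 1)).get? q = some (pvOrigin (pres.map PySem.Set.ofList) i (q + 1)) := by
  intro q hq hc
  rcases (pv_contains_seg pres (i - 1) q hW (by omega)).mp hc with ⟨_, hor⟩
  rw [pv_get?_seg pres (i - 1) q hW (by omega) hq hor]
  have hstep := pvOrigin_step pres i (q + 1) hi (by rw [show q + 1 - 1 = q by omega]; exact hq)
  rw [hstep, show q + 1 - 1 = q by omega]

theorem pv_hlab (pres : List (List Int)) (i : Int)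
    (hW : ∀ u : Int, 0 ≤ u → (PySem.List.pyGetD pres u []).Pairwise (· < ·)) (hi : 1 ≤ i) :
    ∀ q ∈ PySem.List.pyGetD pres (i - 1) [], (pvSegD pres (i - 1)).contains q = false →
      pvLabel (i - 1) q = pvOrigin (pres.map PySem.Set.ofList) i (q + 1) := by
  intro q hq hc
  have hnc : ¬ (q ∈ PySem.List.pyGetD pres (i - 1) []
      ∧ (i - 1 = 0 ∨ q - 1 ∈ PySem.List.pyGetD pres (i - 1 - 1) [])) := by
    intro h
    rw [(pv_contains_seg pres (i - 1) q hW (by omega)).mpr h] at hc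
    exact absurd hc (by simp)
  have h2 : q - 1 ∉ PySem.List.pyGetD pres (i - 1 - 1) [] := by
    intro h; exact hnc ⟨hq, Or.inr h⟩
  rw [pvOrigin_step pres i (q + 1) hi (by rw [show q + 1 - 1 = q by omega]; exact hq),
    show q + 1 - 1 = q by omega,
    pvOrigin_stop pres (i - 1) q (fun h => h2 h.2)]

-- A's retro insertions into window i-1 produce exactly B's finalize of window i-1
theorem pv_fin_eq (pres : List (List Int)) (n i : Int)
    (hW : ∀ u : Int, 0 ≤ u → (PySem.List.pyGetD pres u []).Pairwise (· < ·))
    (hi : 1 ≤ i) (hin : i < n) :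
    PySem.Dict.mk ((pvSegD pres (i - 1)).items
        ++ (PySem.List.pyGetD pres i []).filterMap (fun v =>
          if v - 1 ∈ PySem.List.pyGetD pres (i - 1) []
              ∧ (pvSegD pres (i - 1)).contains (v - 1) = false
          then some (v - 1, pvLabel (i - 1) (v - 1)) else none))
      = pvFinalize pres (pres.map PySem.Set.ofList) n (i - 1) (pvSegD pres (i - 1)) := by
  by_cases h0 : i - 1 = 0
  · -- window 0 already holds every matched position: no retro insertion, finalize skips
    have hnone : ∀ v ∈ PySem.List.pyGetD pres i [],
        (if v - 1 ∈ PySem.List.pyGetD pres (i - 1) []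
            ∧ (pvSegD pres (i - 1)).contains (v - 1) = false
         then some (v - 1, pvLabel (i - 1) (v - 1)) else none) = none := by
      intro v _
      rw [if_neg]
      rintro ⟨hv, hc⟩
      rw [(pv_contains_seg pres (i - 1) (v - 1) hW (by omega)).mpr ⟨hv, Or.inl h0⟩] at hc
      exact absurd hc (by simp)
    rw [List.filterMap_eq_nil_iff.mpr hnone, List.append_nil, pv_dict_eta]
    unfold pvFinalize
    rw [if_neg (by omega)]
  · -- i - 1 ≥ 1: finalize inserts the fresh chain-start keys
    have hfin : 1 ≤ i - 1 ∧ i - 1 + 1 < n := by omega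
    unfold pvFinalize
    rw [if_pos hfin, show i - 1 + 1 = i from by omega]
    simp only [pv_mem_psets]
    set sp := PySem.List.pyGetD pres (i - 1) [] with hsp
    set si := PySem.List.pyGetD pres i [] with hsi
    set K := sp.filter (fun p => decide (p + 1 ∈ si)
        && !decide (p - 1 ∈ PySem.List.pyGetD pres (i - 1 - 1) [])) with hK
    have hfresh : ∀ p ∈ K, (pvSegD pres (i - 1)).contains p = false := by
      intro p hp
      rcases List.mem_filter.mp hp with ⟨hpsp, hcond⟩
      simp only [Bool.and_eq_true, Bool.not_eq_true', decide_eq_false_iff_not] at hcond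
      rw [pv_contains_seg_bool pres (i - 1) p hW (by omega)]
      simp [h0, hcond.2]
    have hKnd : K.Nodup := (pv_nodup_of_pairwise_lt _ (hW (i - 1) (by omega))).filter _
    have hitems := PySem.Dict.items_foldl_insert_fresh K (fun p => p)
      (fun p => pvLabel (i - 1) p) (pvSegD pres (i - 1)) hfresh (by simpa using hKnd)
    beta_reduce at hitems
    apply PySem.Dict.ext
    rw [hitems]
    show _ ++ _ = _
    congr 1
    -- the two retro pair lists agree, by the diagonal shift
    rw [pv_filterMap_if_eq_map_filter si
      (fun v => v - 1 ∈ sp ∧ (pvSegD pres (i - 1)).contains (v - 1) = false)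
      (fun v => (v - 1, pvLabel (i - 1) (v - 1)))]
    have hcdec : ∀ v : Int, decide (v - 1 ∈ sp ∧ (pvSegD pres (i - 1)).contains (v - 1) = false)
        = (decide (v - 1 ∈ sp) && !((pvSegD pres (i - 1)).contains (v - 1))) := by
      intro v
      by_cases h1 : v - 1 ∈ sp <;> cases h2 : (pvSegD pres (i - 1)).contains (v - 1) <;>
        simp [h1]
    have hshift := pv_shift si sp (fun q => !((pvSegD pres (i - 1)).contains q))
      (hW i (by omega)) (hW (i - 1) (by omega))
    beta_reduce at hshift
    have hKeq : sp.filter (fun p => decide (p + 1 ∈ si) && !((pvSegD pres (i - 1)).contains p)) = K := by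
      rw [hK]
      symm
      apply List.filter_congr
      intro p hp
      have hp' : p ∈ PySem.List.pyGetD pres (i - 1) [] := hp
      rw [pv_contains_seg_bool pres (i - 1) p hW (by omega)]
      simp [h0, hp']
    simp only [hcdec]
    rw [show (fun v : Int => (v - 1, pvLabel (i - 1) (v - 1)))
        = ((fun p : Int => (p, pvLabel (i - 1) p)) ∘ (fun v : Int => v - 1)) from rfl,
      ← List.map_map, hshift, hKeq]
  -- note: the filter conditions were aligned pointwise before applying the shift


-- assembling the per-window step on the port's raw fold ----------------------

theorem pv_foldl_append_if_prop (c : Int → Prop) [DecidablePred c] :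
    ∀ (l acc : List Int),
    l.foldl (fun acc x => if c x then acc ++ [x] else acc) acc
      = acc ++ l.filter (fun x => decide (c x)) := by
  intro l
  induction l with
  | nil => intro acc; simp
  | cons x xs ih =>
    intro acc
    by_cases hx : c x <;> simp [hx, ih]

theorem pv_stepFold (pres : List (List Int)) (n i : Int)
    (hW : ∀ u : Int, 0 ≤ u → (PySem.List.pyGetD pres u []).Pairwise (· < ·))
    (hi : 1 ≤ i) (hin : i < n)
    (pl : List (PySem.Dict Int String)) (hlen : i - 1 = (pl.length : Int)) :
    (PySem.List.pyRange 0 (PySem.List.pyGetD pres i []).length 1).foldl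
      (fun (st : List (PySem.Dict Int String) × PySem.Dict Int String) j =>
        (PySem.List.pyRange 0 (PySem.List.pyGetD pres (i - 1) []).length 1).foldl (fun st k =>
          if PySem.List.pyGetD (PySem.List.pyGetD pres i []) j 0
              = PySem.List.pyGetD (PySem.List.pyGetD pres (i - 1) []) k 0 + 1 then
            if ((PySem.List.pyGetD st.1 (i - 1) PySem.Dict.empty).contains
                (PySem.List.pyGetD (PySem.List.pyGetD pres (i - 1) []) k 0)) = false then
              (PySem.List.pySetD st.1 (i - 1)
                 ((PySem.List.pyGetD st.1 (i - 1) PySem.Dict.empty).insert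
                   (PySem.List.pyGetD (PySem.List.pyGetD pres (i - 1) []) k 0)
                   (pvLabel (i - 1) (PySem.List.pyGetD (PySem.List.pyGetD pres (i - 1) []) k 0))),
               st.2.insert (PySem.List.pyGetD (PySem.List.pyGetD pres i []) j 0)
                 (pvLabel (i - 1) (PySem.List.pyGetD (PySem.List.pyGetD pres (i - 1) []) k 0)))
            else
              (st.1, st.2.insert (PySem.List.pyGetD (PySem.List.pyGetD pres i []) j 0)
                 (((PySem.List.pyGetD st.1 (i - 1) PySem.Dict.empty).get?
                   (PySem.List.pyGetD (PySem.List.pyGetD pres (i - 1) []) k 0)).getD ""))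
          else st) st)
      (pl ++ [pvSegD pres (i - 1)], PySem.Dict.empty)
    = (pl ++ [pvFinalize pres (pres.map PySem.Set.ofList) n (i - 1) (pvSegD pres (i - 1))], pvSegD pres i) := by
  have hndsp : (PySem.List.pyGetD pres (i - 1) []).Nodup :=
    pv_nodup_of_pairwise_lt _ (hW (i - 1) (by omega))
  have hndsi : (PySem.List.pyGetD pres i []).Nodup :=
    pv_nodup_of_pairwise_lt _ (hW i (by omega))
  rw [PySem.List.foldl_pyRange_zero_pyGetD' (PySem.List.pyGetD pres i []) 0
    (fun st v =>
      (PySem.List.pyRange 0 (PySem.List.pyGetD pres (i - 1) []).length 1).foldl (fun st k =>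
        if v = PySem.List.pyGetD (PySem.List.pyGetD pres (i - 1) []) k 0 + 1 then
          if ((PySem.List.pyGetD st.1 (i - 1) PySem.Dict.empty).contains
              (PySem.List.pyGetD (PySem.List.pyGetD pres (i - 1) []) k 0)) = false then
            (PySem.List.pySetD st.1 (i - 1)
               ((PySem.List.pyGetD st.1 (i - 1) PySem.Dict.empty).insert
                 (PySem.List.pyGetD (PySem.List.pyGetD pres (i - 1) []) k 0)
                 (pvLabel (i - 1) (PySem.List.pyGetD (PySem.List.pyGetD pres (i - 1) []) k 0))),
             st.2.insert v
               (pvLabel (i - 1) (PySem.List.pyGetD (PySem.List.pyGetD pres (i - 1) []) k 0)))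
          else
            (st.1, st.2.insert v
               (((PySem.List.pyGetD st.1 (i - 1) PySem.Dict.empty).get?
                 (PySem.List.pyGetD (PySem.List.pyGetD pres (i - 1) []) k 0)).getD ""))
        else st) st)
    (pl ++ [pvSegD pres (i - 1)], PySem.Dict.empty)]
  rw [List.foldl_ext _ (fun st v => if v - 1 ∈ PySem.List.pyGetD pres (i - 1) [] then
      (if ((PySem.List.pyGetD st.1 (i - 1) PySem.Dict.empty).contains (v - 1)) = false then
        (PySem.List.pySetD st.1 (i - 1)
           ((PySem.List.pyGetD st.1 (i - 1) PySem.Dict.empty).insert (v - 1) (pvLabel (i - 1) (v - 1))),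
         st.2.insert v (pvLabel (i - 1) (v - 1)))
      else (st.1, st.2.insert v (((PySem.List.pyGetD st.1 (i - 1) PySem.Dict.empty).get? (v - 1)).getD "")))
    else st) _
    (by
      intro st v _
      rw [PySem.List.foldl_pyRange_zero_pyGetD' (PySem.List.pyGetD pres (i - 1) []) 0
        (fun st p =>
          if v = p + 1 then
            if ((PySem.List.pyGetD st.1 (i - 1) PySem.Dict.empty).contains p) = false then
              (PySem.List.pySetD st.1 (i - 1)
                 ((PySem.List.pyGetD st.1 (i - 1) PySem.Dict.empty).insert p (pvLabel (i - 1) p)),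
               st.2.insert v (pvLabel (i - 1) p))
            else (st.1, st.2.insert v (((PySem.List.pyGetD st.1 (i - 1) PySem.Dict.empty).get? p).getD ""))
          else st) st]
      rw [pv_foldl_unique _ v _ st hndsp])]
  rw [pvPairRed (PySem.List.pyGetD pres (i - 1) []) (i - 1) (PySem.List.pyGetD pres i []) pl
    (pvSegD pres (i - 1)) PySem.Dict.empty hlen]
  rw [pvOuter (PySem.List.pyGetD pres (i - 1) []) (i - 1) (pvSegD pres (i - 1)) (pvOrigin (pres.map PySem.Set.ofList) i)
    (PySem.List.pyGetD pres i []) hndsi (pv_hget pres i hW hi) (pv_hlab pres i hW hi)]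
  rw [pv_fin_eq pres n i hW hi hin]
  rw [← pv_window_eq_mk pres i hndsi]
  rw [show pvSegD pres i = pvWindow pres (pres.map PySem.Set.ofList) i from by unfold pvSegD; rw [if_neg (by omega)]]

-- the loop over windows 1..m ------------------------------------------------

theorem pv_top (pres : List (List Int)) (n : Int)
    (hW : ∀ u : Int, 0 ≤ u → (PySem.List.pyGetD pres u []).Pairwise (· < ·)) :
    ∀ m : Nat, 1 + (m : Int) ≤ n →
    (PySem.List.pyRange 1 (1 + (m : Int)) 1).foldl (fun allSegs i =>
        let si := PySem.List.pyGetD pres i []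
        let sp := PySem.List.pyGetD pres (i - 1) []
        let st := (PySem.List.pyRange 0 si.length 1).foldl
            (fun (st : List (PySem.Dict Int String) × PySem.Dict Int String) j =>
              (PySem.List.pyRange 0 sp.length 1).foldl (fun st k =>
                let v := PySem.List.pyGetD si j 0
                let p := PySem.List.pyGetD sp k 0
                if v = p + 1 then
                  let prev := PySem.List.pyGetD st.1 (i - 1) PySem.Dict.empty
                  if prev.contains p = false then
                    (PySem.List.pySetD st.1 (i - 1) (prev.insert p (pvLabel (i - 1) p)),
                     st.2.insert v (pvLabel (i - 1) p))
                  else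
                    (st.1, st.2.insert v ((prev.get? p).getD ""))
                else st) st)
            (allSegs, PySem.Dict.empty)
        st.1 ++ [st.2]) [pvSegD pres 0]
    = (PySem.List.pyRange 0 (m : Int) 1).map (fun w => pvFinalize pres (pres.map PySem.Set.ofList) n w (pvSegD pres w))
        ++ [pvSegD pres (m : Int)] := by
  intro m
  induction m with
  | zero =>
    intro _
    rw [PySem.List.pyRange_one_eq_nil (by omega), PySem.List.pyRange_one_eq_nil (by omega)]
    simp
  | succ m ih =>
    intro hm
    rw [show ((m + 1 : Nat) : Int) = (m : Int) + 1 from by push_cast; ring]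
    rw [show (1 : Int) + ((m : Int) + 1) = (1 + (m : Int)) + 1 from by ring]
    rw [PySem.List.pyRange_one_succ_right (show (1:Int) ≤ 1 + (m : Int) from by omega),
      List.foldl_append, ih (by omega)]
    rw [PySem.List.pyRange_one_succ_right (show (0:Int) ≤ (m : Int) from by omega), List.map_append]
    simp only [List.foldl_cons, List.foldl_nil, List.map_cons, List.map_nil]
    have hstep := pv_stepFold pres n (1 + (m : Int)) hW (by omega) (by omega)
      ((PySem.List.pyRange 0 (m : Int) 1).map (fun w => pvFinalize pres (pres.map PySem.Set.ofList) n w (pvSegD pres w)))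
      (by rw [List.length_map, PySem.List.length_pyRange_one]; omega)
    rw [show (1 + (m : Int)) - 1 = (m : Int) from by omega] at hstep ⊢
    rw [hstep]
    simp [show (m : Int) + 1 = 1 + (m : Int) from by ring]

-- indexing B's segments list -------------------------------------------------

theorem pv_getD_segments (pres : List (List Int)) (n j : Int) (hj0 : 0 ≤ j) (hjn : j < n) :
    PySem.List.pyGetD (pvSegD pres 0 :: (PySem.List.pyRange 1 n 1).map (fun w => pvWindow pres (pres.map PySem.Set.ofList) w))
      j PySem.Dict.empty = pvSegD pres j := by
  by_cases h0 : j = 0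
  · subst h0; rw [PySem.List.pyGetD_zero_cons]
  · obtain ⟨k, hk⟩ : ∃ k : Nat, j = (k : Int) + 1 := ⟨(j - 1).toNat, by omega⟩
    rw [hk, show ((k : Int) + 1) = ((k + 1 : Nat) : Int) from by push_cast; ring,
      PySem.List.pyGetD_natCast, List.getD_cons_succ, ← PySem.List.pyGetD_natCast,
      PySem.List.pyGetD_map_pyRange_one _ 1 n k _ (by omega)]
    rw [show (1 : Int) + (k : Int) = j from by omega]
    unfold pvSegD
    rw [show ((k + 1 : Nat) : Int) = j from by omega, if_neg h0]


-- the main equivalence -------------------------------------------------------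

theorem pv_main (dataA dataB : List Int) (threshold : Int) (hpre : dataB ≠ []) :
    search_segment_method_with_matching dataA dataB threshold
      = search_segment_method_with_matching_alt dataA dataB threshold := by
  have hlen1 : 1 ≤ dataB.length := List.length_pos_iff.mpr hpre
  simp only [search_segment_method_with_matching, search_segment_method_with_matching_alt]
  set pres : List (List Int) := dataB.map (fun b =>
    (PySem.List.pyRange 0 dataA.length 1).filter (fun j =>
      |b - PySem.List.pyGetD dataA j 0| < threshold)) with hpres
  generalize hq : pres.map PySem.Set.ofList = psets
  have hW : ∀ u : Int, 0 ≤ u → (PySem.List.pyGetD pres u []).Pairwise (· < ·) := by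
    intro u hu
    refine pv_getD_prop (fun l : List Int => l.Pairwise (· < ·)) pres u [] List.Pairwise.nil ?_ hu
    intro l hl
    rw [hpres] at hl
    rcases List.mem_map.mp hl with ⟨b, _, rfl⟩
    exact (PySem.List.pairwise_lt_pyRange_one 0 _).filter _
  have hstart : (PySem.List.pyRange 0 dataB.length 1).foldl (fun si i =>
      si ++ [(PySem.List.pyRange 0 dataA.length 1).foldl (fun cur j =>
        if |PySem.List.pyGetD dataB i 0 - PySem.List.pyGetD dataA j 0| < threshold
        then cur ++ [j] else cur) []]) [] = pres := by
    rw [PySem.List.foldl_append_singleton_eq_map]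
    rw [List.nil_append]
    rw [List.map_congr_left (l := PySem.List.pyRange 0 dataB.length 1)
      (g := fun i => (fun b => (PySem.List.pyRange 0 dataA.length 1).filter (fun j =>
          |b - PySem.List.pyGetD dataA j 0| < threshold)) (PySem.List.pyGetD dataB i 0))
      (by intro i _
          rw [pv_foldl_append_if_prop (fun j =>
            |PySem.List.pyGetD dataB i 0 - PySem.List.pyGetD dataA j 0| < threshold)]
          rw [List.nil_append])]
    rw [show (fun i => (fun b => (PySem.List.pyRange 0 dataA.length 1).filter (fun j =>
          |b - PySem.List.pyGetD dataA j 0| < threshold)) (PySem.List.pyGetD dataB i 0))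
        = ((fun b => (PySem.List.pyRange 0 dataA.length 1).filter (fun j =>
          |b - PySem.List.pyGetD dataA j 0| < threshold)) ∘ (fun i => PySem.List.pyGetD dataB i 0))
        from rfl]
    rw [← List.map_map, PySem.List.map_pyGetD_pyRange_zero']
  rw [hstart]
  have hfirst : (PySem.List.pyRange 0 (PySem.List.pyGetD pres 0 []).length 1).foldl
      (fun d i => d.insert (PySem.List.pyGetD (PySem.List.pyGetD pres 0 []) i 0)
        (pvLabel 0 (PySem.List.pyGetD (PySem.List.pyGetD pres 0 []) i 0))) PySem.Dict.empty
      = pvSegD pres 0 := by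
    rw [PySem.List.foldl_pyRange_zero_pyGetD' (PySem.List.pyGetD pres 0 []) 0
      (fun d v => d.insert v (pvLabel 0 v)) PySem.Dict.empty]
    rw [pv_first_fold_eq]
    unfold pvSegD
    rw [if_pos rfl]
  rw [hfirst]
  rw [show PySem.Dict.ofList ((PySem.List.pyGetD pres 0 []).map (fun v => (v, pvLabel 0 v)))
      = pvSegD pres 0 from by unfold pvSegD; rw [if_pos rfl]]
  have htop := pv_top pres ((dataB.length : Int)) hW (dataB.length - 1)
    (by rw [Nat.cast_sub hlen1]; push_cast; omega)
  rw [show (1 : Int) + ((dataB.length - 1 : Nat) : Int) = (dataB.length : Int) from by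
    rw [Nat.cast_sub hlen1]; push_cast; ring] at htop
  rw [Nat.cast_sub hlen1, Nat.cast_one] at htop
  rw [hq] at htop
  rw [htop]
  -- B side: the enumerate over segments
  rw [PySem.List.enumerate_eq_map_pyRange _ PySem.Dict.empty]
  rw [List.map_map]
  have hseglen : (PySem.List.len (pvSegD pres 0
      :: (PySem.List.pyRange 1 (dataB.length : Int) 1).map (fun i => pvWindow pres psets i)))
      = (dataB.length : Int) := by
    simp only [PySem.List.len, List.length_cons, List.length_map,
      PySem.List.length_pyRange_one]
    push_cast
    omega
  rw [hseglen]
  have hsplit : PySem.List.pyRange 0 (dataB.length : Int) 1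
      = PySem.List.pyRange 0 ((dataB.length : Int) - 1) 1 ++ [(dataB.length : Int) - 1] := by
    rw [← PySem.List.pyRange_one_succ_right (show (0:Int) ≤ (dataB.length : Int) - 1 from by omega)]
    rw [sub_add_cancel]
  rw [hsplit, List.map_append, List.map_append, List.map_map]
  congr 1
  · -- the finished windows 0 .. n-2
    apply List.map_congr_left
    intro j hj
    rcases PySem.List.mem_pyRange_one.mp hj with ⟨hj0, hjn⟩
    simp only [Function.comp_apply]
    have hseg := pv_getD_segments pres (dataB.length : Int) j hj0 (by omega)
    rw [hq] at hseg
    rw [hseg]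
  · -- the last window: finalize is the identity there
    simp only [List.map_cons, List.map_nil, Function.comp_apply]
    have hseg := pv_getD_segments pres (dataB.length : Int) ((dataB.length : Int) - 1)
      (by omega) (by omega)
    rw [hq] at hseg
    rw [hseg]
    rw [show pvFinalize pres psets (dataB.length : Int) ((dataB.length : Int) - 1)
        (pvSegD pres ((dataB.length : Int) - 1)) = pvSegD pres ((dataB.length : Int) - 1) from by
      unfold pvFinalize; rw [if_neg (by omega)]]

-- ===== VERDICT (by name: the statement is the Claim_ definition above) =====
theorem search_segment_method_with_matching_spec : Claim_equal_search_segment_method_with_matching := by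
  intro dataA dataB threshold _ hpre
  show search_segment_method_with_matching dataA dataB threshold = _
  exact pv_main dataA dataB threshold hpre
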